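-- pv_equiv track=rewrite | github.com/cerbernetix/pactole | src/pactole/combinations/combination.py | get_combination_from_rank
-- ===== SOURCE A (Python) =====
-- def get_combination_from_rank(rank: int, length: int = 2, offset: int = 0) -> list[int]:
--     """Get the combination corresponding to a given lexicographic rank.
--
--     Args:
--         rank (int): The lexicographic rank of the combination.
--         length (int, optional): The length of the combination. Defaults to 2.
--         offset (int, optional): An offset to apply to each value in the combination. Defaults to 0.
--
--     Returns:
--         list[int]: The combination corresponding to the lexicographic rank.
--
--     Raises:
--         ValueError: If the rank or length is negative.
--
--     Examples:
--         >>> get_combination_from_rank(0, 3)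
--         [0, 1, 2]
--         >>> get_combination_from_rank(2, 3)
--         [0, 2, 3]
--         >>> get_combination_from_rank(0, 3, offset=1)
--         [1, 2, 3]
--     """
--     if rank < 0:
--         raise ValueError("The rank must not be negative")
--
--     if length < 0:
--         raise ValueError("The length must not be negative")
--
--     if length == 0:
--         return []
--
--     if length == 1:
--         return [rank + offset]
--
--     combination = [0] * length
--
--     binomial = 0
--     val = 0
--     b = 1
--     while b <= rank:
--         val += 1
--         binomial = b
--         b = (b * (val + length)) // val
--
--     for index in range(length - 1, 1, -1):
--         rank -= binomial
--         binomial = (binomial * (index + 1)) // (val + index)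
--         combination[index] = val + index + offset
--
--         while binomial > rank:
--             val -= 1
--             binomial = (binomial * val) // (val + index)
--
--     combination[1] = val + 1 + offset
--     combination[0] = rank - binomial + offset
--
--     return combination
-- ===== SOURCE B (Python) =====
-- def _binom(n, k):
--     """Binomial coefficient C(n, k) by the exact multiplicative formula (symmetric form)."""
--     if k < 0 or k > n:
--         return 0
--     r = 1
--     for i in range(min(k, n - k)):
--         r = r * (n - i) // (i + 1)
--     return r
--
--
-- def _unrank(rank, k):
--     """[c_0, ..., c_{k-1}] with c_0 < ... < c_{k-1} and sum of C(c_i, i+1) == rank: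
--     each top element is found by exponential growth + binary search over C(v, k)."""
--     result = []
--     while k > 1:
--         d = 1
--         while _binom(k - 1 + d, k) <= rank:
--             d *= 2
--         lo, hi = k - 1, k - 1 + d
--         while lo + 1 < hi:
--             mid = (lo + hi) // 2
--             if _binom(mid, k) <= rank:
--                 lo = mid
--             else:
--                 hi = mid
--         result.append(lo)
--         rank -= _binom(lo, k)
--         k -= 1
--     if k == 1:
--         result.append(rank)
--     result.reverse()
--     return result
--
--
-- def get_combination_from_rank(rank: int, length: int = 2, offset: int = 0) -> list[int]:
--     """Unrank a combination by binary-searching each element in the combinatorial number system."""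
--     if rank < 0:
--         raise ValueError("The rank must not be negative")
--     if length < 0:
--         raise ValueError("The length must not be negative")
--     return [c + offset for c in _unrank(rank, length)]
-- ===== Notes on version B (the rewrite author's own statement) =====
-- stated objective: alternative
-- what changed: A unranks with a linear scan that incrementally updates one running binomial across two nested while loops; B re-derives each element of the combinatorial number system independently by exponential-growth plus binary search over directly computed C(v,k) (much faster at large rank with small length, slower by a constant factor at very large length).
import Mathlib
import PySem

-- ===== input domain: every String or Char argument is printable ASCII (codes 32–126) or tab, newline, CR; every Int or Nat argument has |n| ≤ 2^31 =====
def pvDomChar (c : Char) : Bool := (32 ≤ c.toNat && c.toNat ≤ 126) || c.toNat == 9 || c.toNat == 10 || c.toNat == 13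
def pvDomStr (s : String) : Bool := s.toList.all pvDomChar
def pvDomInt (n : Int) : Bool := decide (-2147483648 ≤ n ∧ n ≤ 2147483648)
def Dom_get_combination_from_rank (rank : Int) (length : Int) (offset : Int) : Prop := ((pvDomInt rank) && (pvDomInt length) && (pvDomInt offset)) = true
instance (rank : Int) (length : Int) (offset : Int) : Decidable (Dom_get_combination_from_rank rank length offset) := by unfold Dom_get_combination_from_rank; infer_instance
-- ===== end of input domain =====

-- A unranks by a linear scan with one incrementally updated binomial; B re-derives each element of the
-- combinatorial number system independently by exponential growth + binary search over directly
-- computed C(v,k) (a genuinely different algorithm of comparable cost).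

-- ===== PORT A =====
-- while b <= rank: val += 1; binomial = b; b = (b * (val + length)) // val
def pvA_grow (rank : Int) (length : Int) : Nat → Int × Int × Int → Int × Int × Int
  | 0, s => s
  | fuel+1, (binomial, val, b) =>
    if b ≤ rank then
      pvA_grow rank length fuel (b, val + 1, PySem.Int.floordiv (b * ((val + 1) + length)) (val + 1))
    else (binomial, val, b)

-- while binomial > rank: val -= 1; binomial = (binomial * val) // (val + index)
def pvA_shrink (rank : Int) (index : Int) : Nat → Int × Int → Int × Int
  | 0, s => s
  | fuel+1, (binomial, val) =>
    if binomial > rank then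
      pvA_shrink rank index fuel (PySem.Int.floordiv (binomial * (val - 1)) ((val - 1) + index), val - 1)
    else (binomial, val)

-- one iteration of `for index in range(length - 1, 1, -1)`; state = (rank, binomial, val, combination)
def pvA_step (offset : Int) (st : Int × Int × Int × List Int) (index : Int) : Int × Int × Int × List Int :=
  let rank := st.1 - st.2.1
  let binomial := PySem.Int.floordiv (st.2.1 * (index + 1)) (st.2.2.1 + index)
  let comb := PySem.List.pySetD st.2.2.2 index (st.2.2.1 + index + offset)
  let bv := pvA_shrink rank index (st.2.2.1.toNat + 1) (binomial, st.2.2.1)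
  (rank, bv.1, bv.2, comb)

def get_combination_from_rank (rank : Int) (length : Int) (offset : Int) : List Int :=
  if rank < 0 then []        -- Python raises ValueError; excluded by Pre_
  else if length < 0 then [] -- Python raises ValueError; excluded by Pre_
  else if length = 0 then []
  else if length = 1 then [rank + offset]
  else
    let combination : List Int := List.replicate length.toNat 0
    let g := pvA_grow rank length (rank.toNat + 1) (0, 0, 1)
    let st := (PySem.List.pyRange (length - 1) 1 (-1)).foldl (pvA_step offset) (rank, g.1, g.2.1, combination)
    PySem.List.pySetD (PySem.List.pySetD st.2.2.2 1 (st.2.2.1 + 1 + offset)) 0 (st.1 - st.2.1 + offset)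

-- ===== PORT B =====
def pvB_binom (n : Int) (k : Int) : Int :=
  if k < 0 ∨ n < k then 0
  else (PySem.List.pyRange 0 (min k (n - k)) 1).foldl (fun r i => PySem.Int.floordiv (r * (n - i)) (i + 1)) 1

-- while _binom(k - 1 + d, k) <= rank: d *= 2
def pvB_growD (rank : Int) (k : Int) : Nat → Int → Int
  | 0, d => d
  | f+1, d => if pvB_binom (k - 1 + d) k ≤ rank then pvB_growD rank k f (d * 2) else d

-- while lo + 1 < hi: mid = (lo + hi) // 2; …
def pvB_bisect (rank : Int) (k : Int) : Nat → Int → Int → Int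
  | 0, lo, _ => lo
  | f+1, lo, hi =>
    if lo + 1 < hi then
      let mid := PySem.Int.floordiv (lo + hi) 2
      if pvB_binom mid k ≤ rank then pvB_bisect rank k f mid hi
      else pvB_bisect rank k f lo mid
    else lo

-- the `while k > 1` loop of _unrank; state = (rank, k, result); the Nat fuel only makes it structural
def pvB_loop : Nat → Int × Int × List Int → Int × Int × List Int
  | 0, s => s
  | f+1, (rank, k, result) =>
    if 1 < k then
      let d := pvB_growD rank k (rank.toNat + 2) 1
      let lo := pvB_bisect rank k d.toNat (k - 1) (k - 1 + d)
      pvB_loop f (rank - pvB_binom lo k, k - 1, result ++ [lo])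
    else (rank, k, result)

def pvB_unrank (rank : Int) (k : Int) : List Int :=
  let s := pvB_loop k.toNat (rank, k, [])
  (if s.2.1 = 1 then s.2.2 ++ [s.1] else s.2.2).reverse

def get_combination_from_rank_alt (rank : Int) (length : Int) (offset : Int) : List Int :=
  if rank < 0 then []        -- Python raises ValueError; excluded by Pre_
  else if length < 0 then [] -- Python raises ValueError; excluded by Pre_
  else (pvB_unrank rank length).map (fun c => c + offset)

-- ===== PRECONDITION & SPEC =====
-- Pre_ excludes exactly the inputs on which A (and B) raise ValueError: negative rank or negative length.
def Pre_get_combination_from_rank (rank : Int) (length : Int) (offset : Int) : Prop := 0 ≤ rank ∧ 0 ≤ length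
instance (rank : Int) (length : Int) (offset : Int) : Decidable (Pre_get_combination_from_rank rank length offset) := by unfold Pre_get_combination_from_rank; infer_instance
def pvWitness_get_combination_from_rank : Int × Int × Int := (7, 3, 1)

def Spec_get_combination_from_rank (rank : Int) (length : Int) (offset : Int) (out : List Int) : Prop := out = get_combination_from_rank_alt rank length offset
instance (rank : Int) (length : Int) (offset : Int) (out : List Int) : Decidable (Spec_get_combination_from_rank rank length offset out) := by unfold Spec_get_combination_from_rank; infer_instance

-- ===== CLAIM (what is proved, stated in full; the proofs are below) =====
def Claim_equal_get_combination_from_rank : Prop := ∀ (rank : Int) (length : Int) (offset : Int), Dom_get_combination_from_rank rank length offset → Pre_get_combination_from_rank rank length offset → Spec_get_combination_from_rank rank length offset (get_combination_from_rank rank length offset)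

-- ===== LEMMAS AND PROOFS =====

-- C(k + m, k) ≥ m + 1 for k ≥ 1
lemma pv_add_choose (k m : Nat) (hk : 1 ≤ k) : m + 1 ≤ Nat.choose (k + m) k := by
  obtain ⟨j, rfl⟩ : ∃ j, k = j + 1 := ⟨k - 1, by omega⟩
  induction m with
  | zero => simp
  | succ m ih =>
    have h1 : 1 ≤ Nat.choose (j + 1 + m) j := Nat.choose_pos (by omega)
    have h2 : Nat.choose (j + 1 + m + 1) (j + 1) = Nat.choose (j + 1 + m) j + Nat.choose (j + 1 + m) (j + 1) :=
      Nat.choose_succ_succ (j + 1 + m) j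
    rw [show j + 1 + (m + 1) = j + 1 + m + 1 by omega]
    omega

lemma pv_exists_gt (r k : Nat) (hk : 1 ≤ k) : ∃ c, r < Nat.choose c k :=
  ⟨k + r, by have := pv_add_choose k r hk; omega⟩

def pvMax (r k : Nat) : Nat := if hk : 1 ≤ k then Nat.find (pv_exists_gt r k hk) - 1 else 0

lemma pvMax_lt (r k : Nat) (hk : 1 ≤ k) : r < Nat.choose (pvMax r k + 1) k := by
  unfold pvMax
  rw [dif_pos hk]
  have hs := Nat.find_spec (pv_exists_gt r k hk)
  have hF : Nat.find (pv_exists_gt r k hk) ≠ 0 := by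
    intro h
    rw [h, Nat.choose_eq_zero_of_lt (by omega)] at hs
    omega
  rw [Nat.sub_add_cancel (by omega)]
  exact hs

lemma pvMax_le (r k : Nat) (hk : 1 ≤ k) : Nat.choose (pvMax r k) k ≤ r := by
  unfold pvMax
  rw [dif_pos hk]
  by_cases h0 : Nat.find (pv_exists_gt r k hk) = 0
  · rw [h0]
    simp [Nat.choose_eq_zero_of_lt hk]
  · have := Nat.find_min (pv_exists_gt r k hk) (m := Nat.find (pv_exists_gt r k hk) - 1) (by omega)
    omega

lemma pvMax_ge_of_le (r k c : Nat) (hk : 1 ≤ k) (h : Nat.choose c k ≤ r) : c ≤ pvMax r k := by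
  by_contra hc
  have h1 := pvMax_lt r k hk
  have h2 : Nat.choose (pvMax r k + 1) k ≤ Nat.choose c k := Nat.choose_le_choose k (by omega)
  omega

lemma pvMax_unique (r k c : Nat) (hk : 1 ≤ k) (h1 : Nat.choose c k ≤ r) (h2 : r < Nat.choose (c + 1) k) : pvMax r k = c := by
  have h3 := pvMax_ge_of_le r k c hk h1
  have h4 := pvMax_le r k hk
  by_contra hne
  have h5 : c + 1 ≤ pvMax r k := by omega
  have h6 := Nat.choose_le_choose k h5
  omega

lemma pvMax_one (r : Nat) : pvMax r 1 = r := by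
  apply pvMax_unique r 1 r le_rfl
  · simp
  · simp

lemma pvMax_ge_pred (r k : Nat) (hk : 1 ≤ k) : k - 1 ≤ pvMax r k :=
  pvMax_ge_of_le r k (k - 1) hk (by rw [Nat.choose_eq_zero_of_lt (by omega)]; omega)

def pvSpec : Nat → Nat → List Nat
  | _, 0 => []
  | r, k+1 => pvSpec (r - Nat.choose (pvMax r (k+1)) (k+1)) k ++ [pvMax r (k+1)]

-- ---- B side ----
lemma pvB_binom_fold (n : Nat) : ∀ j : Nat, j ≤ n →
    (PySem.List.pyRange 0 (j:Int) 1).foldl (fun r i => PySem.Int.floordiv (r * ((n:Int) - i)) (i + 1)) 1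
      = (Nat.choose n j : Int) := by
  intro j
  induction j with
  | zero =>
    intro _
    simp
  | succ j ih =>
    intro hj
    rw [show ((j+1 : Nat) : Int) = (j:Int) + 1 by push_cast; ring]
    rw [PySem.List.pyRange_one_succ_right (by positivity)]
    rw [List.foldl_append, ih (by omega)]
    simp only [List.foldl_cons, List.foldl_nil]
    rw [show (Nat.choose n j : Int) * ((n:Int) - (j:Int)) = ((Nat.choose n j * (n - j) : Nat) : Int) by
      push_cast [Nat.cast_sub (by omega : j ≤ n)]; ring]
    rw [show ((j:Int) + 1) = ((j + 1 : Nat) : Int) by push_cast; ring]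
    rw [PySem.Int.floordiv_natCast]
    rw [← Nat.choose_succ_right_eq, Nat.mul_div_cancel _ (by omega)]

lemma pvB_binom_eq (n k : Nat) : pvB_binom (n:Int) (k:Int) = (Nat.choose n k : Int) := by
  unfold pvB_binom
  by_cases h : n < k
  · rw [if_pos (Or.inr (by exact_mod_cast h)), Nat.choose_eq_zero_of_lt h]
    rfl
  · rw [if_neg (by omega)]
    rw [show min (k:Int) ((n:Int) - (k:Int)) = ((min k (n - k) : Nat) : Int) by
      push_cast [Nat.cast_sub (by omega : k ≤ n)]; rfl]
    rw [pvB_binom_fold n (min k (n - k)) (by omega)]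
    rcases Nat.le_total k (n - k) with hle | hle
    · rw [Nat.min_eq_left hle]
    · rw [Nat.min_eq_right hle, Nat.choose_symm (by omega : k ≤ n)]

lemma pvB_growD_spec (r k : Nat) (hk : 1 ≤ k) : ∀ (f : Nat) (d : Nat), 1 ≤ d → r < d * 2 ^ f →
    ∃ e : Nat, pvB_growD (r:Int) (k:Int) f (d:Int) = (e:Int) ∧ 1 ≤ e ∧ r < Nat.choose (k - 1 + e) k := by
  intro f
  induction f with
  | zero =>
    intro d hd hb
    refine ⟨d, rfl, hd, ?_⟩
    have h1 := pv_add_choose k (d - 1) hk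
    rw [show k + (d - 1) = k - 1 + d by omega] at h1
    simp at hb
    omega
  | succ f ih =>
    intro d hd hb
    unfold pvB_growD
    rw [show (k:Int) - 1 + (d:Int) = ((k - 1 + d : Nat) : Int) by push_cast [Nat.cast_sub hk]; ring]
    rw [pvB_binom_eq]
    by_cases hle : (Nat.choose (k - 1 + d) k : Int) ≤ (r:Int)
    · rw [if_pos hle]
      rw [show (d:Int) * 2 = ((d * 2 : Nat) : Int) by push_cast; ring]
      refine ih (d * 2) (by omega) ?_
      have h2 : d * 2 ^ (f + 1) = d * 2 * 2 ^ f := by ring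
      omega
    · rw [if_neg hle]
      exact ⟨d, rfl, hd, by exact_mod_cast not_le.mp hle⟩

lemma pvB_bisect_spec (r k : Nat) (hk : 1 ≤ k) : ∀ (f : Nat) (lo hi : Nat), lo < hi → hi - lo ≤ f + 1 →
    Nat.choose lo k ≤ r → r < Nat.choose hi k →
    pvB_bisect (r:Int) (k:Int) f (lo:Int) (hi:Int) = ((pvMax r k : Nat) : Int) := by
  intro f
  induction f with
  | zero =>
    intro lo hi hlt hf h1 h2
    have he : hi = lo + 1 := by omega
    subst he
    unfold pvB_bisect
    rw [pvMax_unique r k lo hk h1 h2]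
  | succ f ih =>
    intro lo hi hlt hf h1 h2
    unfold pvB_bisect
    by_cases hc : (lo:Int) + 1 < (hi:Int)
    · rw [if_pos hc]
      have hc' : lo + 1 < hi := by exact_mod_cast hc
      have hml : lo < (lo + hi) / 2 := by omega
      have hmh : (lo + hi) / 2 < hi := by omega
      have hmid : PySem.Int.floordiv ((lo:Int) + (hi:Int)) 2 = (((lo + hi) / 2 : Nat) : Int) := by
        rw [show (lo:Int) + (hi:Int) = ((lo + hi : Nat) : Int) by push_cast; ring]
        exact_mod_cast PySem.Int.floordiv_natCast (lo + hi) 2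
      rw [hmid]
      show (if pvB_binom (((lo + hi) / 2 : Nat) : Int) (k:Int) ≤ (r:Int) then
              pvB_bisect (r:Int) (k:Int) f (((lo + hi) / 2 : Nat) : Int) (hi:Int)
            else pvB_bisect (r:Int) (k:Int) f (lo:Int) (((lo + hi) / 2 : Nat) : Int)) = ((pvMax r k : Nat) : Int)
      rw [pvB_binom_eq]
      by_cases hle : (Nat.choose ((lo + hi) / 2) k : Int) ≤ (r:Int)
      · rw [if_pos hle]
        exact ih ((lo + hi) / 2) hi hmh (by omega) (by exact_mod_cast hle) h2
      · rw [if_neg hle]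
        exact ih lo ((lo + hi) / 2) hml (by omega) h1 (by exact_mod_cast not_le.mp hle)
    · rw [if_neg hc]
      have he : hi = lo + 1 := by
        have : ¬ (lo + 1 < hi) := by exact_mod_cast hc
        omega
      subst he
      rw [pvMax_unique r k lo hk h1 h2]

lemma pvSpec_length : ∀ (k r : Nat), (pvSpec r k).length = k := by
  intro k
  induction k with
  | zero => intro r; rfl
  | succ k ih => intro r; simp [pvSpec, ih]

lemma pvB_loop_spec : ∀ (f : Nat) (r k : Nat) (h : Int) (tl acc : List Int),
    1 ≤ k → k - 1 ≤ f → (pvSpec r k).map (fun c : Nat => (c : Int)) = h :: tl →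
    pvB_loop f ((r:Int), (k:Int), acc) = (h, 1, acc ++ tl.reverse) := by
  intro f
  induction f with
  | zero =>
    intro r k h tl acc hk hf hspec
    have hk1 : k = 1 := by omega
    subst hk1
    rw [show pvSpec r 1 = [r] by simp [pvSpec, pvMax_one]] at hspec
    simp at hspec
    obtain ⟨rfl, rfl⟩ := hspec
    simp [pvB_loop]
  | succ f ih =>
    intro r k h tl acc hk hf hspec
    by_cases hk1 : k = 1
    · subst hk1
      rw [show pvSpec r 1 = [r] by simp [pvSpec, pvMax_one]] at hspec
      simp at hspec
      obtain ⟨rfl, rfl⟩ := hspec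
      show (if (1:Int) < ((1:Nat):Int) then _ else (((r:Nat):Int), ((1:Nat):Int), acc)) = _
      rw [if_neg (by norm_num)]
      simp
    · have hk2 : 2 ≤ k := by omega
      obtain ⟨m, rfl⟩ : ∃ m, k = m + 1 + 1 := ⟨k - 2, by omega⟩
      obtain ⟨e, heq, he1, hre⟩ := pvB_growD_spec r (m+1+1) (by omega) (r + 2) 1 le_rfl (by
        have h1 : r < 2 ^ r := Nat.lt_two_pow_self
        have h2 : (2:Nat) ^ r ≤ 2 ^ (r + 2) := Nat.pow_le_pow_right (by omega) (by omega)
        omega)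
      have hbi := pvB_bisect_spec r (m+1+1) (by omega) e (m+1) (m+1+1-1+e) (by omega) (by omega)
        (by rw [Nat.choose_eq_zero_of_lt (by omega)]; omega) hre
      have hle := pvMax_le r (m+1+1) (by omega)
      show (if (1:Int) < (((m+1+1 : Nat)):Int) then
          pvB_loop f
            (((r:Nat):Int) - pvB_binom (pvB_bisect ((r:Nat):Int) (((m+1+1:Nat)):Int) (pvB_growD ((r:Nat):Int) (((m+1+1:Nat)):Int) ((((r:Nat):Int)).toNat + 2) 1).toNat ((((m+1+1:Nat)):Int) - 1) ((((m+1+1:Nat)):Int) - 1 + pvB_growD ((r:Nat):Int) (((m+1+1:Nat)):Int) ((((r:Nat):Int)).toNat + 2) 1)) (((m+1+1:Nat)):Int),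
             (((m+1+1:Nat)):Int) - 1,
             acc ++ [pvB_bisect ((r:Nat):Int) (((m+1+1:Nat)):Int) (pvB_growD ((r:Nat):Int) (((m+1+1:Nat)):Int) ((((r:Nat):Int)).toNat + 2) 1).toNat ((((m+1+1:Nat)):Int) - 1) ((((m+1+1:Nat)):Int) - 1 + pvB_growD ((r:Nat):Int) (((m+1+1:Nat)):Int) ((((r:Nat):Int)).toNat + 2) 1)])
        else (((r:Nat):Int), (((m+1+1:Nat)):Int), acc)) = (h, 1, acc ++ tl.reverse)
      rw [if_pos (by exact_mod_cast (by omega : (1:Nat) < m+1+1))]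
      rw [Nat.cast_one] at heq
      rw [Int.toNat_natCast, heq, Int.toNat_natCast]
      rw [show (((m+1+1:Nat)):Int) - 1 = ((m+1 : Nat) : Int) by push_cast; ring]
      rw [show ((m+1 : Nat) : Int) + ((e:Nat):Int) = ((m+1+1-1+e : Nat) : Int) by push_cast; omega]
      rw [hbi, pvB_binom_eq]
      rw [show ((r:Nat):Int) - ((Nat.choose (pvMax r (m+1+1)) (m+1+1) : Nat) : Int)
          = ((r - Nat.choose (pvMax r (m+1+1)) (m+1+1) : Nat) : Int) by push_cast [Nat.cast_sub hle]; ring]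
      set R' := r - Nat.choose (pvMax r (m+1+1)) (m+1+1) with hR'
      have hsp : (pvSpec r (m+1+1)).map (fun c : Nat => (c : Int))
          = (pvSpec R' (m+1)).map (fun c : Nat => (c : Int)) ++ [((pvMax r (m+1+1) : Nat) : Int)] := by
        show (pvSpec R' (m+1) ++ [pvMax r (m+1+1)]).map (fun c : Nat => (c : Int)) = _
        simp
      rw [hsp] at hspec
      have hlen : (pvSpec R' (m+1)).length = m + 1 := pvSpec_length (m+1) R'
      rcases hmap : (pvSpec R' (m+1)).map (fun c : Nat => (c : Int)) with _ | ⟨h', tl'⟩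
      · have := congrArg List.length hmap
        simp [hlen] at this
      · rw [hmap] at hspec
        simp only [List.cons_append] at hspec
        injection hspec with hh ht
        subst hh
        subst ht
        rw [ih R' (m+1) h' tl' (acc ++ [((pvMax r (m+1+1) : Nat) : Int)]) (by omega) (by omega) hmap]
        simp

lemma pvB_unrank_eq (r k : Nat) : pvB_unrank (r:Int) (k:Int) = (pvSpec r k).map (fun c : Nat => (c : Int)) := by
  rcases Nat.eq_zero_or_pos k with hk0 | hk1
  · subst hk0
    show ((if (pvB_loop ((0:Nat):Int).toNat ((r:Int), ((0:Nat):Int), [])).2.1 = 1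
        then (pvB_loop ((0:Nat):Int).toNat ((r:Int), ((0:Nat):Int), [])).2.2 ++ [(pvB_loop ((0:Nat):Int).toNat ((r:Int), ((0:Nat):Int), [])).1]
        else (pvB_loop ((0:Nat):Int).toNat ((r:Int), ((0:Nat):Int), [])).2.2)).reverse = _
    norm_num [pvB_loop, pvSpec]
  · have hlen : (pvSpec r k).length = k := pvSpec_length k r
    rcases hmap : (pvSpec r k).map (fun c : Nat => (c : Int)) with _ | ⟨h, tl⟩
    · have := congrArg List.length hmap
      simp [hlen] at this
      omega
    · show ((if (pvB_loop ((k:Int)).toNat ((r:Int), (k:Int), [])).2.1 = 1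
          then (pvB_loop ((k:Int)).toNat ((r:Int), (k:Int), [])).2.2 ++ [(pvB_loop ((k:Int)).toNat ((r:Int), (k:Int), [])).1]
          else (pvB_loop ((k:Int)).toNat ((r:Int), (k:Int), [])).2.2)).reverse = _
      rw [Int.toNat_natCast]
      rw [pvB_loop_spec k r k h tl [] (by omega) (by omega) hmap]
      simp

lemma pvB_main (r L : Nat) (offset : Int) :
    get_combination_from_rank_alt (r:Int) (L:Int) offset
      = (pvSpec r L).map (fun c : Nat => (c : Int) + offset) := by
  unfold get_combination_from_rank_alt
  rw [if_neg (by omega), if_neg (by omega)]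
  rw [pvB_unrank_eq, List.map_map]
  rfl

-- ---- A side ----
lemma pvA_step_eq (offset ra bi va : Int) (comb : List Int) (i : Int) :
    pvA_step offset (ra, bi, va, comb) i =
      (ra - bi,
       (pvA_shrink (ra - bi) i (va.toNat + 1) (PySem.Int.floordiv (bi * (i + 1)) (va + i), va)).1,
       (pvA_shrink (ra - bi) i (va.toNat + 1) (PySem.Int.floordiv (bi * (i + 1)) (va + i), va)).2,
       PySem.List.pySetD comb i (va + i + offset)) := rfl

lemma pvA_grow_spec (r L : Nat) (hL : 2 ≤ L) : ∀ (f : Nat) (v : Nat),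
    v ≤ pvMax r L - (L - 1) → pvMax r L - (L - 1) - v ≤ f →
    pvA_grow (r:Int) (L:Int) f ((Nat.choose (L + v - 1) L : Int), (v:Int), (Nat.choose (L + v) L : Int))
      = ((Nat.choose (L + (pvMax r L - (L - 1)) - 1) L : Int),
         ((pvMax r L - (L - 1) : Nat) : Int),
         (Nat.choose (L + (pvMax r L - (L - 1))) L : Int)) := by
  intro f
  induction f with
  | zero =>
    intro v h1 h2
    have hv : v = pvMax r L - (L - 1) := by omega
    rw [hv]
    rfl
  | succ f ih =>
    intro v h1 h2
    show (if (Nat.choose (L + v) L : Int) ≤ (r:Int) then _ else _) = _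
    by_cases hle : Nat.choose (L + v) L ≤ r
    · rw [if_pos (by exact_mod_cast hle)]
      have hmax : L + v ≤ pvMax r L := pvMax_ge_of_le r L (L + v) (by omega) hle
      have hd : PySem.Int.floordiv ((Nat.choose (L + v) L : Int) * (((v:Int) + 1) + (L:Int))) ((v:Int) + 1)
          = (Nat.choose (L + (v + 1)) L : Int) := by
        rw [show ((v:Int) + 1) + (L:Int) = ((v + 1 + L : Nat) : Int) by push_cast; ring]
        rw [show (Nat.choose (L + v) L : Int) * ((v + 1 + L : Nat) : Int) = ((Nat.choose (L + v) L * (v + 1 + L) : Nat) : Int) by push_cast; ring]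
        rw [show ((v:Int) + 1) = ((v + 1 : Nat) : Int) by push_cast; ring]
        rw [PySem.Int.floordiv_natCast]
        congr 1
        have hid := Nat.choose_mul_succ_eq (L + v) L
        rw [show L + v + 1 - L = v + 1 by omega] at hid
        rw [show v + 1 + L = L + v + 1 by omega, hid]
        rw [Nat.mul_div_cancel _ (by omega), show L + v + 1 = L + (v + 1) by omega]
      rw [hd]
      have := ih (v + 1) (by omega) (by omega)
      rw [show ((v:Int) + 1) = ((v + 1 : Nat) : Int) by push_cast; ring]
      rw [show L + v = L + (v + 1) - 1 by omega]
      exact this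
    · rw [if_neg (by exact_mod_cast hle)]
      have hub : pvMax r L ≤ L + v - 1 := by
        by_contra hcon
        have h3 : Nat.choose (L + v) L ≤ Nat.choose (pvMax r L) L := Nat.choose_le_choose L (by omega)
        have h4 := pvMax_le r L (by omega)
        omega
      have hv : v = pvMax r L - (L - 1) := by
        have := pvMax_ge_pred r L (by omega)
        omega
      rw [hv]

lemma pvA_shrink_spec (r k : Nat) (hk : 1 ≤ k) : ∀ (f : Nat) (v : Nat), v ≤ f → r < Nat.choose (v + k) k →
    pvA_shrink (r:Int) (k:Int) f ((Nat.choose (v + k - 1) k : Int), (v:Int))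
      = ((Nat.choose (pvMax r k) k : Int), ((pvMax r k - (k - 1) : Nat) : Int)) := by
  intro f
  induction f with
  | zero =>
    intro v hv hlt
    have hv0 : v = 0 := by omega
    subst hv0
    rw [Nat.zero_add, Nat.choose_self] at hlt
    have hr0 : r = 0 := by omega
    subst hr0
    have hm : pvMax 0 k = k - 1 := pvMax_unique 0 k (k - 1) hk
      (by rw [Nat.choose_eq_zero_of_lt (by omega)])
      (by rw [show k - 1 + 1 = k by omega, Nat.choose_self]; omega)
    rw [hm, Nat.choose_eq_zero_of_lt (by omega)]
    rw [Nat.choose_eq_zero_of_lt (show k - 1 < k by omega), show k - 1 - (k - 1) = 0 by omega]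
    rfl
  | succ f ih =>
    intro v hv hlt
    show (if (r:Int) < (Nat.choose (v + k - 1) k : Int) then _ else _) = _
    by_cases hgt : r < Nat.choose (v + k - 1) k
    · rw [if_pos (by exact_mod_cast hgt)]
      obtain ⟨w, rfl⟩ : ∃ w, v = w + 1 := by
        refine ⟨v - 1, ?_⟩
        rcases Nat.eq_zero_or_pos v with h0 | h0
        · subst h0
          rw [Nat.choose_eq_zero_of_lt (by omega)] at hgt
          omega
        · omega
      have hd : PySem.Int.floordiv ((Nat.choose (w + 1 + k - 1) k : Int) * (((w + 1 : Nat) : Int) - 1))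
            ((((w + 1 : Nat) : Int) - 1) + (k:Int)) = (Nat.choose (w + k - 1) k : Int) := by
        rw [show (((w + 1 : Nat) : Int) - 1) = ((w : Nat) : Int) by push_cast; ring]
        rw [show ((w:Int) + (k:Int)) = ((w + k : Nat) : Int) by push_cast; ring]
        rw [show (Nat.choose (w + 1 + k - 1) k : Int) * ((w : Nat) : Int) = ((Nat.choose (w + k) k * w : Nat) : Int) by
          rw [show w + 1 + k - 1 = w + k by omega]; push_cast; ring]
        rw [PySem.Int.floordiv_natCast]
        congr 1
        have hid := Nat.choose_mul_succ_eq (w + k - 1) k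
        rw [show w + k - 1 + 1 = w + k by omega, show w + k - k = w by omega] at hid
        rw [← hid, Nat.mul_div_cancel _ (by omega)]
      rw [hd]
      rw [show (((w + 1 : Nat) : Int)) - 1 = ((w : Nat) : Int) by push_cast; ring]
      exact ih w (by omega) (by rw [show w + k = w + 1 + k - 1 by omega]; exact hgt)
    · rw [if_neg (by exact_mod_cast hgt)]
      have hm : pvMax r k = v + k - 1 := pvMax_unique r k (v + k - 1) hk (by omega)
        (by rw [show v + k - 1 + 1 = v + k by omega]; exact hlt)
      rw [hm, show v + k - 1 - (k - 1) = v by omega]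

lemma pvA_rest (offset : Int) (L : Nat) (hL : 2 ≤ L) : ∀ (j r v : Nat) (comb : List Int),
    1 ≤ j → j ≤ L - 1 → comb.length = L → v + j = pvMax r (j + 1) →
    (fun st : Int × Int × Int × List Int =>
        PySem.List.pySetD (PySem.List.pySetD st.2.2.2 1 (st.2.2.1 + 1 + offset)) 0 (st.1 - st.2.1 + offset))
      ((PySem.List.pyRange (j:Int) 1 (-1)).foldl (pvA_step offset) ((r:Int), (Nat.choose (v + j) (j + 1) : Int), (v:Int), comb))
      = (pvSpec r (j + 1)).map (fun c : Nat => (c : Int) + offset) ++ comb.drop (j + 1) := by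
  intro j
  induction j with
  | zero => omega
  | succ m ih =>
    intro r v comb h1 h2 hlen hmax
    by_cases hm0 : m = 0
    · -- base: j = 1, the loop body is empty and only the two final writes happen
      subst hm0
      rw [PySem.List.pyRange_neg_one_eq_nil (by norm_num)]
      simp only [List.foldl_nil]
      rcases comb with _ | ⟨a, comb⟩
      · simp at hlen; omega
      rcases comb with _ | ⟨b, t⟩
      · simp at hlen; omega
      norm_num at hmax ⊢
      have hle := pvMax_le r 2 (by omega)
      have hs : pvSpec r 2 = [r - Nat.choose (pvMax r 2) 2, pvMax r 2] := by
        simp [pvSpec, pvMax_one]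
      show PySem.List.pySetD (PySem.List.pySetD (a :: b :: t) 1 ((v:Int) + 1 + offset)) 0
          ((r:Int) - (Nat.choose (v + 1) 2 : Int) + offset)
        = (pvSpec r 2).map (fun c : Nat => (c : Int) + offset) ++ (a :: b :: t).drop 2
      rw [PySem.List.pySetD_of_nonneg _ _ (by omega : (0:Int) ≤ 1), show ((1:Int)).toNat = 1 from rfl]
      rw [show (a :: b :: t).set 1 ((v:Int) + 1 + offset) = a :: ((v:Int) + 1 + offset) :: t from rfl]
      rw [PySem.List.pySetD_of_nonneg _ _ (by omega : (0:Int) ≤ 0), show ((0:Int)).toNat = 0 from rfl]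
      rw [show (a :: ((v:Int) + 1 + offset) :: t).set 0
          ((r:Int) - (Nat.choose (v + 1) 2 : Int) + offset)
          = ((r:Int) - (Nat.choose (v + 1) 2 : Int) + offset) :: ((v:Int) + 1 + offset) :: t from rfl]
      rw [hs]
      simp only [List.map_cons, List.map_nil, List.cons_append, List.nil_append, List.drop_succ_cons, List.drop_zero]
      congr 2
      · have hsub : Nat.choose (v + 1) 2 ≤ r := by rw [hmax]; exact hle
        rw [← hmax, Nat.cast_sub hsub]
      · rw [← hmax]
        push_cast
        ring
    · -- step: peel index j = m + 1 off the countdown range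
      have hm1 : 1 ≤ m := by omega
      have hle : Nat.choose (v + (m+1)) (m+1+1) ≤ r := by rw [hmax]; exact pvMax_le r (m+1+1) (by omega)
      have hlt : r < Nat.choose (v + (m+1) + 1) (m+1+1) := by
        have := pvMax_lt r (m+1+1) (by omega)
        rw [← hmax] at this
        exact this
      set R' := r - Nat.choose (v + (m+1)) (m+1+1) with hR'
      have hinv : R' < Nat.choose (v + (m+1)) (m+1) := by
        have hp := Nat.choose_succ_succ' (v + (m+1)) (m+1)
        omega
      have hpm : m ≤ pvMax R' (m+1) := pvMax_ge_pred R' (m+1) (by omega)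
      have hra : (r:Int) - (Nat.choose (v + (m+1)) (m+1+1) : Int) = ((R' : Nat) : Int) := by
        rw [hR']
        push_cast [Nat.cast_sub hle]
        ring
      have hb : ((v:Int)).toNat + 1 = v + 1 := by rw [Int.toNat_natCast]
      have hc : PySem.Int.floordiv ((Nat.choose (v + (m+1)) (m+1+1) : Int) * (((m+1 : Nat) : Int) + 1)) ((v:Int) + ((m+1 : Nat) : Int))
          = (Nat.choose (v + (m+1) - 1) (m+1) : Int) := by
        rw [show (((m+1 : Nat) : Int) + 1) = ((m+1+1 : Nat) : Int) by push_cast; ring]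
        rw [show (Nat.choose (v + (m+1)) (m+1+1) : Int) * ((m+1+1 : Nat) : Int) = ((Nat.choose (v + (m+1)) (m+1+1) * (m+1+1) : Nat) : Int) by push_cast; ring]
        rw [show ((v:Int) + ((m+1 : Nat) : Int)) = ((v + (m+1) : Nat) : Int) by push_cast; ring]
        rw [PySem.Int.floordiv_natCast]
        congr 1
        have hid := Nat.succ_mul_choose_eq (v + m) (m+1)
        rw [show (v + m).succ = v + (m+1) by omega, show (m+1).succ = m+1+1 by omega] at hid
        rw [← hid, Nat.mul_div_cancel_left _ (by omega), show v + (m+1) - 1 = v + m by omega]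
      have hsh := pvA_shrink_spec R' (m+1) (by omega) (v + 1) v (by omega)
        (by rw [show v + (m+1) = v + (m+1) by rfl]; exact hinv)
      have hstep : pvA_step offset ((r:Int), (Nat.choose (v + (m+1)) (m+1+1) : Int), (v:Int), comb) ((m+1 : Nat) : Int)
          = (((R' : Nat) : Int), (Nat.choose ((pvMax R' (m+1) - m) + m) (m+1) : Int),
             ((pvMax R' (m+1) - (m+1-1) : Nat) : Int),
             comb.set (m+1) ((v:Int) + ((m+1 : Nat) : Int) + offset)) := by
        rw [pvA_step_eq, hra, hb, hc, hsh, PySem.List.pySetD_natCast]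
        rw [show pvMax R' (m+1) - m + m = pvMax R' (m+1) by omega]
      rw [PySem.List.pyRange_neg_one_cons (by exact_mod_cast (by omega : (1:Nat) < m+1))]
      rw [show ((m+1 : Nat) : Int) - 1 = ((m : Nat) : Int) by push_cast; ring]
      rw [List.foldl_cons, hstep]
      rw [show (m+1-1) = m from rfl]
      rw [ih R' (pvMax R' (m+1) - m) (comb.set (m+1) ((v:Int) + ((m+1 : Nat) : Int) + offset))
        hm1 (by omega) (by rw [List.length_set]; exact hlen) (by omega)]
      have hdrop : (comb.set (m+1) ((v:Int) + ((m+1 : Nat) : Int) + offset)).drop (m+1)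
          = ((v:Int) + ((m+1 : Nat) : Int) + offset) :: comb.drop (m+1+1) := by
        rw [List.drop_set, if_neg (by omega), Nat.sub_self]
        rw [List.drop_eq_getElem_cons (by omega : m+1 < comb.length)]
        rfl
      rw [hdrop]
      have hspec : pvSpec r (m+1+1) = pvSpec R' (m+1) ++ [pvMax r (m+1+1)] := by
        show pvSpec (r - Nat.choose (pvMax r (m+1+1)) (m+1+1)) (m+1) ++ [pvMax r (m+1+1)] = _
        rw [← hmax, hR']
      rw [hspec, List.map_append]
      rw [← hmax]
      push_cast
      simp [List.append_assoc]

lemma pvA_main (r L : Nat) (offset : Int) (hL : 2 ≤ L) :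
    get_combination_from_rank (r:Int) (L:Int) offset = (pvSpec r L).map (fun c : Nat => (c : Int) + offset) := by
  have hpm := pvMax_ge_pred r L (by omega)
  have hVle : pvMax r L - (L - 1) ≤ r := by
    rcases Nat.eq_zero_or_pos (pvMax r L - (L - 1)) with h0 | h0
    · omega
    · have h1 := pv_add_choose L (pvMax r L - (L - 1) - 1) (by omega)
      have h2 := pvMax_le r L (by omega)
      have h3 : L + (pvMax r L - (L - 1) - 1) = pvMax r L := by omega
      rw [h3] at h1
      omega
  unfold get_combination_from_rank
  rw [if_neg (by omega), if_neg (by omega),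
      if_neg (by exact_mod_cast (by omega : ¬ L = 0)),
      if_neg (by exact_mod_cast (by omega : ¬ L = 1))]
  show (fun st : Int × Int × Int × List Int =>
      PySem.List.pySetD (PySem.List.pySetD st.2.2.2 1 (st.2.2.1 + 1 + offset)) 0 (st.1 - st.2.1 + offset))
    ((PySem.List.pyRange ((L:Int) - 1) 1 (-1)).foldl (pvA_step offset)
      ((r:Int), (pvA_grow (r:Int) (L:Int) (((r:Int)).toNat + 1) (0, 0, 1)).1,
       (pvA_grow (r:Int) (L:Int) (((r:Int)).toNat + 1) (0, 0, 1)).2.1,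
       List.replicate (((L:Int)).toNat) 0))
    = (pvSpec r L).map (fun c : Nat => (c : Int) + offset)
  rw [Int.toNat_natCast, Int.toNat_natCast]
  have hg : pvA_grow (r:Int) (L:Int) (r + 1) (0, 0, 1)
      = ((Nat.choose (L + (pvMax r L - (L - 1)) - 1) L : Int),
         ((pvMax r L - (L - 1) : Nat) : Int),
         (Nat.choose (L + (pvMax r L - (L - 1))) L : Int)) := by
    have hgs := pvA_grow_spec r L hL (r + 1) 0 (by omega) (by omega)
    have e1 : ((L + 0 - 1).choose L) = 0 := Nat.choose_eq_zero_of_lt (by omega)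
    have e2 : ((L + 0).choose L) = 1 := by rw [Nat.add_zero, Nat.choose_self]
    rw [e1, e2] at hgs
    norm_num at hgs
    exact hgs
  rw [hg]
  have hrest := pvA_rest offset L hL (L - 1) r (pvMax r L - (L - 1)) (List.replicate L 0)
    (by omega) le_rfl (by simp) (by rw [show L - 1 + 1 = L by omega]; omega)
  rw [show L - 1 + 1 = L by omega] at hrest
  rw [show pvMax r L - (L - 1) + (L - 1) = L + (pvMax r L - (L - 1)) - 1 by omega] at hrest
  rw [show (L:Int) - 1 = ((L - 1 : Nat) : Int) by push_cast [Nat.cast_sub (by omega : 1 ≤ L)]; ring]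
  rw [hrest]
  rw [List.drop_of_length_le (by simp)]
  simp

-- ===== VERDICT (by name: the statement is the Claim_ definition above) =====
theorem get_combination_from_rank_spec : Claim_equal_get_combination_from_rank := by
  intro rank length offset _ hPre
  unfold Pre_get_combination_from_rank at hPre
  unfold Spec_get_combination_from_rank
  obtain ⟨hr, hl⟩ := hPre
  obtain ⟨r, rfl⟩ : ∃ r : Nat, rank = (r:Int) := ⟨rank.toNat, by omega⟩
  obtain ⟨L, rfl⟩ : ∃ L : Nat, length = (L:Int) := ⟨length.toNat, by omega⟩
  rw [pvB_main]
  obtain _ | _ | n := L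
  case _ =>
    unfold get_combination_from_rank
    rw [if_neg (by omega), if_neg (by omega), if_pos (by norm_num)]
    simp [pvSpec]
  case _ =>
    unfold get_combination_from_rank
    rw [if_neg (by omega), if_neg (by omega), if_neg (by norm_num), if_pos (by norm_num)]
    simp [pvSpec, pvMax_one]
  case _ =>
    exact pvA_main r (n+2) offset (by omega)
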